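-- pv_equiv track=rewrite | github.com/ilambrev/freeCodeCamp-Daily-Challenges | Python_Solutions/2025_11/2025_11_30_ai_detector.py | detect_ai
-- ===== SOURCE A (Python) =====
-- from string import ascii_letters
--
-- def detect_ai(text):
--     dashes_count = text.count("-")
--     opening_parenthesis_count = text.count("(")
--     words = text.split()
--     words_with_seven_letters = len([word for word in words if len([letter for letter in word if letter in ascii_letters]) >= 7])
--
--     if dashes_count >= 2 or opening_parenthesis_count >= 2 or words_with_seven_letters >= 3:
--         return "AI"
--     else:
--         return "Human"
-- ===== SOURCE B (Python) =====
-- from string import ascii_letters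
--
-- def detect_ai(text):
--     dashes = opens = seven = letters = 0
--     for c in text:
--         if c == '-':
--             dashes += 1
--         if c == '(':
--             opens += 1
--         if c.isspace():
--             if letters >= 7:
--                 seven += 1
--             letters = 0
--         elif c in ascii_letters:
--             letters += 1
--     if letters >= 7:
--         seven += 1
--     return "AI" if dashes >= 2 or opens >= 2 or seven >= 3 else "Human"
-- ===== Notes on version B (the rewrite author's own statement) =====
-- stated objective: alternative
-- what changed: Replaced the three separate passes (two str.count scans plus split() with a nested comprehension) by one fused char-by-char pass maintaining dash/paren/letter-run counters, finalizing a word at each whitespace boundary.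
import Mathlib
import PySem

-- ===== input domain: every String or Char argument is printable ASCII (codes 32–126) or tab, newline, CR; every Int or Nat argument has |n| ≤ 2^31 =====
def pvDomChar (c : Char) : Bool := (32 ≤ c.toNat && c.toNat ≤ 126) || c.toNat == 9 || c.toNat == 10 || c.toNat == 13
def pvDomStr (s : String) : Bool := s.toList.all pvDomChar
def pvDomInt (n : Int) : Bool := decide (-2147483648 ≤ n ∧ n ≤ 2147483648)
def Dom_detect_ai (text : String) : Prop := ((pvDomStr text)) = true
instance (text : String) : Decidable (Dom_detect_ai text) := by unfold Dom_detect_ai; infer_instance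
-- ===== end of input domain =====

-- B replaces A's three separate passes (two str.count scans + split() with a nested
-- comprehension) by one fused char-by-char pass with counters; same results, no intermediate lists.

-- shared constant: Python's string.ascii_letters (a module-level constant both versions import)
def pvAsciiLetters : List Char :=
  "abcdefghijklmnopqrstuvwxyzABCDEFGHIJKLMNOPQRSTUVWXYZ".toList

-- ===== PORT A =====
def detect_ai (text : String) : String :=
  let dashes_count := PySem.Str.count text "-"
  let opening_parenthesis_count := PySem.Str.count text "("
  let words := PySem.Str.split₀ text
  let words_with_seven_letters :=
    (words.filter (fun word =>
      (word.toList.filter (fun letter => letter ∈ pvAsciiLetters)).length ≥ 7)).length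
  if dashes_count ≥ 2 ∨ opening_parenthesis_count ≥ 2 ∨ words_with_seven_letters ≥ 3 then
    "AI"
  else
    "Human"

-- ===== PORT B =====
-- single fused pass: state = (dashes, opens, seven, letters-in-current-run)
def detect_ai_alt_step (st : Nat × Nat × Nat × Nat) (c : Char) : Nat × Nat × Nat × Nat :=
  let (dashes, opens, seven, letters) := st
  let dashes := if c = '-' then dashes + 1 else dashes
  let opens := if c = '(' then opens + 1 else opens
  if PySem.Chars.isspace c then
    (dashes, opens, if letters ≥ 7 then seven + 1 else seven, 0)
  else if c ∈ pvAsciiLetters then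
    (dashes, opens, seven, letters + 1)
  else
    (dashes, opens, seven, letters)

def detect_ai_alt (text : String) : String :=
  let (dashes, opens, seven, letters) := text.toList.foldl detect_ai_alt_step (0, 0, 0, 0)
  let seven := if letters ≥ 7 then seven + 1 else seven
  if dashes ≥ 2 ∨ opens ≥ 2 ∨ seven ≥ 3 then "AI" else "Human"

-- ===== PRECONDITION & SPEC =====
def Spec_detect_ai (text : String) (out : String) : Prop := out = detect_ai_alt text
instance (text : String) (out : String) : Decidable (Spec_detect_ai text out) := by unfold Spec_detect_ai; infer_instance

-- ===== CLAIM (what is proved, stated in full; the proofs are below) =====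
def Claim_equal_detect_ai : Prop := ∀ (text : String), Dom_detect_ai text → Spec_detect_ai text (detect_ai text)

-- ===== LEMMAS AND PROOFS =====

-- predicate "word has ≥ 7 ascii letters"
def pvP (w : List Char) : Bool := 7 ≤ (w.filter (fun c => c ∈ pvAsciiLetters)).length

-- single-char substring count = char count
theorem pv_count_go_single (ch : Char) :
    ∀ (fuel : Nat) (l : List Char) (acc : Nat), l.length ≤ fuel →
      PySem.Chars.count.go [ch] fuel l acc = acc + l.count ch := by
  intro fuel
  induction fuel with
  | zero =>
      intro l acc h
      cases l with
      | nil => simp [PySem.Chars.count.go]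
      | cons a t => simp at h
  | succ n ih =>
      intro l acc h
      cases l with
      | nil => simp [PySem.Chars.count.go]
      | cons a t =>
          simp only [PySem.Chars.count.go]
          by_cases hc : ch = a
          · subst hc
            simp only [List.isPrefixOf, BEq.rfl, Bool.and_true, List.isPrefixOf_nil_left,
              if_true, List.length_cons, List.drop_succ_cons, List.drop_zero,
              List.length_nil, List.drop]
            rw [ih t (acc + 1) (by simpa using h)]
            simp [List.count_cons]
            omega
          · have hpre : List.isPrefixOf [ch] (a :: t) = false := by
              simp [List.isPrefixOf]
              exact fun hh => absurd hh hc
            rw [hpre]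
            simp only [Bool.false_eq_true, if_false]
            rw [ih t acc (by simp at h; omega)]
            simp [List.count_cons, hc]
            intro hh; exact absurd hh.symm hc

theorem pv_count_single (ch : Char) (s : List Char) :
    PySem.Chars.count s [ch] = s.count ch := by
  simp only [PySem.Chars.count, List.isEmpty_cons, if_false, Bool.false_eq_true]
  simpa using pv_count_go_single ch s.length s 0 le_rfl

-- split₀.go accumulates acc in front
theorem pv_go_acc :
    ∀ (rest cur : List Char) (acc : List (List Char)),
      PySem.Chars.split₀.go rest cur acc = acc.reverse ++ PySem.Chars.split₀.go rest cur [] := by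
  intro rest
  induction rest with
  | nil =>
      intro cur acc
      by_cases h : cur.isEmpty
      · simp [PySem.Chars.split₀.go, h]
      · simp [PySem.Chars.split₀.go, h]
  | cons c t ih =>
      intro cur acc
      by_cases hs : PySem.Chars.isspace c
      · by_cases h : cur.isEmpty
        · simp only [PySem.Chars.split₀.go, hs, h, if_true]
          exact ih [] acc
        · simp only [PySem.Chars.split₀.go, hs, h, if_true, Bool.false_eq_true, if_false]
          rw [ih [] (cur.reverse :: acc), ih [] [cur.reverse]]
          simp
      · simp only [PySem.Chars.split₀.go, hs, Bool.false_eq_true, if_false]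
        exact ih (c :: cur) acc

-- the seven/letters components of B's fold, recursively
def pvSW : List Char → Nat × Nat → Nat × Nat
  | [], st => st
  | c :: t, (s, lt) =>
      if PySem.Chars.isspace c then
        pvSW t (if lt ≥ 7 then s + 1 else s, 0)
      else if c ∈ pvAsciiLetters then
        pvSW t (s, lt + 1)
      else
        pvSW t (s, lt)

def pvFinal (st : Nat × Nat) : Nat := if st.2 ≥ 7 then st.1 + 1 else st.1

-- B's fold projects to (count '-', count '(', pvSW)
theorem pv_fold_proj :
    ∀ (l : List Char) (d o s lt : Nat),
      l.foldl detect_ai_alt_step (d, o, s, lt)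
        = (d + l.count '-', o + l.count '(', pvSW l (s, lt)) := by
  intro l
  induction l with
  | nil => intro d o s lt; simp [pvSW]
  | cons c t ih =>
      intro d o s lt
      simp only [List.foldl_cons, detect_ai_alt_step]
      by_cases hs : PySem.Chars.isspace c <;>
        by_cases hl : c ∈ pvAsciiLetters <;>
          by_cases hd : c = '-' <;>
            by_cases ho : c = '(' <;>
              simp_all [ih, pvSW, List.count_cons] <;> omega

-- key lemma: pvSW + finalization = A's count of ≥7-letter words
theorem pv_sw_split :
    ∀ (rest cur : List Char) (s : Nat),
      pvFinal (pvSW rest (s, cur.countP (fun c => c ∈ pvAsciiLetters)))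
        = s + ((PySem.Chars.split₀.go rest cur []).countP pvP) := by
  intro rest
  induction rest with
  | nil =>
      intro cur s
      by_cases h : cur.isEmpty
      · have : cur = [] := by simpa [List.isEmpty_iff] using h
        subst this
        simp [PySem.Chars.split₀.go, pvSW, pvFinal]
      · simp only [PySem.Chars.split₀.go, h, Bool.false_eq_true, if_false]
        simp only [pvSW, pvFinal, List.countP_cons, List.countP_nil]
        by_cases h7 : 7 ≤ cur.countP (fun c => c ∈ pvAsciiLetters)
        · have : pvP cur.reverse = true := by
            simp [pvP, ← List.countP_eq_length_filter, List.countP_reverse]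
            omega
          simp [h7, this]
        · have : pvP cur.reverse = false := by
            simp [pvP, ← List.countP_eq_length_filter, List.countP_reverse]
            omega
          simp [h7, this]
  | cons c t ih =>
      intro cur s
      by_cases hs : PySem.Chars.isspace c
      · by_cases h : cur.isEmpty
        · have hc : cur = [] := by simpa [List.isEmpty_iff] using h
          subst hc
          simp only [PySem.Chars.split₀.go, hs, if_true, List.isEmpty_nil]
          simpa [pvSW, hs] using ih [] s
        · simp only [PySem.Chars.split₀.go, hs, h, if_true, Bool.false_eq_true, if_false]
          rw [pv_go_acc t [] [cur.reverse]]
          simp only [pvSW, hs, if_true, List.countP_append, List.reverse_cons,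
            List.reverse_nil, List.nil_append, List.countP_cons, List.countP_nil]
          by_cases h7 : 7 ≤ cur.countP (fun c => c ∈ pvAsciiLetters)
          · have hp : pvP cur.reverse = true := by
              simp [pvP, ← List.countP_eq_length_filter, List.countP_reverse]; omega
            have := ih [] (s + 1)
            simp only [List.countP_nil] at this
            simp [h7, hp, this]
            omega
          · have hp : pvP cur.reverse = false := by
              simp [pvP, ← List.countP_eq_length_filter, List.countP_reverse]; omega
            have := ih [] s
            simp only [List.countP_nil] at this
            simp [h7, hp, this]
      · simp only [PySem.Chars.split₀.go, hs, Bool.false_eq_true, if_false]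
        by_cases hl : c ∈ pvAsciiLetters
        · have := ih (c :: cur) s
          simp only [List.countP_cons, hl] at this
          simpa [pvSW, hs, hl] using this
        · have := ih (c :: cur) s
          simp only [List.countP_cons, hl] at this
          simpa [pvSW, hs, hl] using this

-- A's word count reduces to countP pvP over split₀.go
theorem pv_words_eq (text : String) :
    ((PySem.Str.split₀ text).filter (fun word =>
      (word.toList.filter (fun letter => letter ∈ pvAsciiLetters)).length ≥ 7)).length
    = (PySem.Chars.split₀.go text.toList [] []).countP pvP := by
  rw [← List.countP_eq_length_filter]
  simp only [PySem.Str.split₀, PySem.Chars.split₀, List.countP_map]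
  apply List.countP_congr
  intro w _
  simp [pvP, Function.comp, List.countP_eq_length_filter]

-- ===== VERDICT (by name: the statement is the Claim_ definition above) =====
theorem detect_ai_spec : Claim_equal_detect_ai := by
  intro text _
  unfold Spec_detect_ai detect_ai detect_ai_alt
  have hfold := pv_fold_proj text.toList 0 0 0 0
  rw [hfold]
  simp only [PySem.Str.count, show ("-".toList) = ['-'] from rfl,
    show ("(".toList) = ['('] from rfl, pv_count_single]
  have hsw := pv_sw_split text.toList [] 0
  simp only [List.countP_nil, Nat.zero_add] at hsw
  rw [pv_words_eq]
  simp only [pvFinal] at hsw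
  simp only [Nat.zero_add, PySem.Chars.split₀] at *
  rcases hpair : pvSW text.toList (0, 0) with ⟨sv, lv⟩
  rw [hpair] at hsw
  simp only at hsw
  rw [← hsw]
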